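-- pv_equiv track=rewrite | github.com/SourangshuGhosh/StructuralReliability | reliability.py | reversals
-- ===== SOURCE A (Python) =====
-- def reversals(series):
--     """
--     A generator function which iterates over the reversals in the iterable
--     *series*. Reversals are the points at which the first
--     derivative on the series changes sign. The generator never yields
--     the first and the last points in the series.
--     """
--     series = iter(series)
--
--     x_last, x = next(series), next(series)
--     d_last = (x - x_last)
--
--     for x_next in series:
--         if x_next == x:
--             continue
--         d_next = x_next - x
--         if d_last * d_next < 0:
--             yield x
--         x_last, x = x, x_next
--         d_last = d_next
-- ===== SOURCE B (Python) =====
-- def reversals(series):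
--     # Staged-passes re-implementation: materialize the series, collapse runs of
--     # consecutive equal values, then scan overlapping triples of the distinct
--     # values and yield every strict local extremum. NOTE: unlike A, this
--     # materializes the whole series up front (not lazy on infinite iterators);
--     # the return value is identical on finite series.
--     it = iter(series)
--     first, second = next(it), next(it)
--     vals = [first, second]
--     vals.extend(it)
--     distinct = [v for i, v in enumerate(vals) if i == 0 or v != vals[i - 1]]
--     for a, b, c in zip(distinct, distinct[1:], distinct[2:]):
--         if (b - a) * (b - c) > 0:
--             yield b
-- ===== Notes on version B (the rewrite author's own statement) =====
-- stated objective: alternative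
-- what changed: B is a staged-passes pipeline: it materializes the series, collapses consecutive duplicates in one pass, then scans overlapping triples of the distinct values (zip of three shifted views) and yields strict local extrema, instead of A's single stateful streaming pass that maintains running derivatives; B is not lazy on infinite iterators (return value on finite input is identical).
import Mathlib
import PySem

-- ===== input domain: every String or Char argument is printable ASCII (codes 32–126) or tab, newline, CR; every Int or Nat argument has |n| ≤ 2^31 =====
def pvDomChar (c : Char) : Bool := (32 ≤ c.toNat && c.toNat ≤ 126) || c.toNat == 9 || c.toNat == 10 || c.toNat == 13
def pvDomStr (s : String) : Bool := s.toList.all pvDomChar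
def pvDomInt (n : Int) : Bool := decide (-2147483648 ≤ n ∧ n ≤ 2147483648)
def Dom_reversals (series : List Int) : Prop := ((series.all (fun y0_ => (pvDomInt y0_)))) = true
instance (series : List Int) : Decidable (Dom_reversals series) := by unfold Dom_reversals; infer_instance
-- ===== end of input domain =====

-- B replaces A's single stateful streaming pass (running derivatives, product test)
-- by a staged pipeline: collapse consecutive duplicates, then scan triples of the
-- distinct values for strict local extrema (alternative decomposition, same cost).
-- Both are Python generators, ported as the list of yielded values; B materializes
-- the input (not lazy), a side-effect difference only — return values are equal.

-- ===== PORT A =====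
-- loop body of A: state (x_last, x, d_last), yields collected in order
def revLoopA (x_last x d_last : Int) : List Int → List Int
  | [] => []
  | x_next :: rest =>
    if x_next == x then revLoopA x_last x d_last rest
    else
      let d_next := x_next - x
      (if d_last * d_next < 0 then [x] else []) ++ revLoopA x x_next d_next rest

def reversals (series : List Int) : List Int :=
  match series with
  | x_last :: x :: rest => revLoopA x_last x (x - x_last) rest
  | _ => []   -- Python raises RuntimeError here; excluded by Pre_reversals

-- ===== PORT B =====
-- pass 1 of B: keep each value that differs from its predecessor (head kept by the
-- caller, matching the i == 0 clause of the comprehension)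
def distinctB (prev : Int) : List Int → List Int
  | [] => []
  | x :: rest => (if x ≠ prev then [x] else []) ++ distinctB x rest

-- pass 2 of B: the zip over three shifted views = scan of overlapping triples;
-- the (a, b) parameters are the current triple's first two components
def tripleScanB (a b : Int) : List Int → List Int
  | [] => []
  | c :: rest => (if (b - a) * (b - c) > 0 then [b] else []) ++ tripleScanB b c rest

def triplesB (l : List Int) : List Int :=
  match l with
  | [] => []
  | [_] => []
  | a :: b :: rest => tripleScanB a b rest

def reversals_alt (series : List Int) : List Int :=
  match series with
  | [] => []   -- Python raises RuntimeError on [] and [_]; excluded by Pre_reversals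
  | first :: rest' => triplesB (first :: distinctB first rest')

-- ===== PRECONDITION & SPEC =====
-- Both Pythons raise RuntimeError (StopIteration in the generator) on series with
-- fewer than two elements; Pre_ admits exactly the inputs on which A returns.
def Pre_reversals (series : List Int) : Prop := 2 ≤ series.length
instance (series : List Int) : Decidable (Pre_reversals series) := by unfold Pre_reversals; infer_instance
def pvWitness_reversals : List Int := [0, 1, 0]

def Spec_reversals (series : List Int) (out : List Int) : Prop := out = reversals_alt series
instance (series : List Int) (out : List Int) : Decidable (Spec_reversals series out) := by unfold Spec_reversals; infer_instance

-- ===== CLAIM (what is proved, stated in full; the proofs are below) =====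
def Claim_equal_reversals : Prop := ∀ (series : List Int), Dom_reversals series → Pre_reversals series → Spec_reversals series (reversals series)

-- ===== LEMMAS AND PROOFS =====

-- A's loop with state (prev, mid, mid - prev) computes B's triple scan over
-- prev :: mid :: the consecutively-distinct tail
theorem loopA_eq_triplesB (rest : List Int) : ∀ prev mid : Int,
    revLoopA prev mid (mid - prev) rest = triplesB (prev :: mid :: distinctB mid rest) := by
  induction rest with
  | nil => intro prev mid; simp [revLoopA, distinctB, triplesB, tripleScanB]
  | cons x rest ih =>
    intro prev mid
    simp only [revLoopA, distinctB]
    by_cases hx : x = mid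
    · simp [hx, ih prev mid]
    · have hsign : ((mid - prev) * (x - mid) < 0) ↔ ((mid - prev) * (mid - x) > 0) := by
        constructor <;> intro h <;> nlinarith
      simp only [beq_iff_eq, hx, if_false, ne_eq, not_false_iff, if_pos,
        List.singleton_append, triplesB, tripleScanB, hsign, ih mid x]

-- the equal-first-two case: A's zero initial derivative never yields, and B's
-- dedup drops the duplicated head
theorem loopA_zero_eq (rest : List Int) : ∀ a : Int,
    revLoopA a a 0 rest = triplesB (a :: distinctB a rest) := by
  induction rest with
  | nil => intro a; simp [revLoopA, distinctB, triplesB, tripleScanB]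
  | cons x rest ih =>
    intro a
    simp only [revLoopA, distinctB]
    by_cases hx : x = a
    · simp [hx, ih a]
    · simp only [beq_iff_eq, hx, if_false, ne_eq, not_false_iff, if_pos, zero_mul,
        lt_irrefl, List.nil_append, List.singleton_append]
      exact loopA_eq_triplesB rest a x

-- ===== VERDICT (by name: the statement is the Claim_ definition above) =====
theorem reversals_spec : Claim_equal_reversals := by
  intro series _ hpre
  unfold Spec_reversals
  match series with
  | [] => simp [Pre_reversals] at hpre
  | [_] => simp [Pre_reversals] at hpre
  | a :: b :: rest =>
    simp only [reversals, reversals_alt, distinctB]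
    by_cases hab : b = a
    · subst hab
      simp only [ne_eq, not_true_eq_false, if_false, List.nil_append, sub_self]
      exact loopA_zero_eq rest b
    · simp only [ne_eq, hab, not_false_iff, if_pos, List.singleton_append]
      exact loopA_eq_triplesB rest a b
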